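-- pv_equiv track=rewrite | github.com/hkarhani/syslogConfigGen | syslogutils.py | getProps
-- ===== SOURCE A (Python) =====
-- def getProps(msg, left_delimiter = '<<', right_delimiter=">>"):
--     """Extract Variables found in Delimiters within an msg String and returns their list - except ip / mac."""
--     msgList = msg.split(left_delimiter)
--     varList = []
--     for rem in msgList:
--         if rem.find(right_delimiter)!=-1:
--             varList.append(rem[:rem.find(right_delimiter)])
--     finalVarList = []
--     for _var in varList:
--         if _var =='ip' or _var =='mac':
--             pass
--         else:
--             finalVarList.append("_".join(_var.lower().split(' ')))
--     return finalVarList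
-- ===== SOURCE B (Python) =====
-- def getProps(msg, left_delimiter = '<<', right_delimiter=">>"):
--     """Single streaming scan: walk the message left-delimiter by left-delimiter,
--     handling each segment as it is found, instead of materialising the split
--     list and then running two filtering passes."""
--     out = []
--     rest = msg
--     while True:
--         j = rest.find(left_delimiter)
--         piece = rest if j == -1 else rest[:j]
--         k = piece.find(right_delimiter)
--         if k != -1:
--             var = piece[:k]
--             if var != 'ip' and var != 'mac':
--                 out.append('_'.join(var.lower().split(' ')))
--         if j == -1:
--             return out
--         rest = rest[j + len(left_delimiter):]
-- ===== Notes on version B (the rewrite author's own statement) =====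
-- stated objective: alternative
-- what changed: Replaced split-into-a-list plus two filtering passes by a single streaming scan that finds each left delimiter in turn and handles the segment immediately.
import Mathlib
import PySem

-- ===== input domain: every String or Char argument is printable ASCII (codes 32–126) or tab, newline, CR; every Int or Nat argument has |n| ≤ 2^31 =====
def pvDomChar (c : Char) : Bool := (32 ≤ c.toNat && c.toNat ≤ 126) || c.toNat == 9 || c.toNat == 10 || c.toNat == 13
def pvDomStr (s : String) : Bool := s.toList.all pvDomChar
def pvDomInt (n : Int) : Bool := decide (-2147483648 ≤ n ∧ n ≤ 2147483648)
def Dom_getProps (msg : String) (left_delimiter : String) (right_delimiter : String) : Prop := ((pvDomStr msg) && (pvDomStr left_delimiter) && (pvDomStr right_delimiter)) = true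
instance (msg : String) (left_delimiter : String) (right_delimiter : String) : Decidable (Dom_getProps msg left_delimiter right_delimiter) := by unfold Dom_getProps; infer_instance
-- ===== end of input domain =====

-- B replaces A's split-into-a-list plus two filtering passes by a single streaming
-- scan over the message (objective: alternative structure, same cost).


-- shared port of the Python expression "_".join(v.lower().split(' ')), which both
-- A and B contain verbatim (split(' ') has a nonempty separator, so it is splitOn)
def pvJoinLowerSplit (v : List Char) : List Char :=
  PySem.Chars.join ['_'] (PySem.Chars.splitOn (PySem.Chars.lower v) [' '])

-- ===== PORT A =====
def getProps (msg : String) (left_delimiter : String) (right_delimiter : String) : List String :=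
  match PySem.Chars.split? msg.toList left_delimiter.toList with
  | none => []    -- Python A raises ValueError here; excluded by Pre_
  | some msgList =>
    let varList := msgList.foldl (fun acc rem =>
      if PySem.Chars.find rem right_delimiter.toList ≠ -1 then
        acc ++ [PySem.Chars.slice rem none (some (PySem.Chars.find rem right_delimiter.toList))]
      else acc) []
    let finalVarList := varList.foldl (fun acc v =>
      if v = "ip".toList ∨ v = "mac".toList then acc
      else acc ++ [pvJoinLowerSplit v]) []
    finalVarList.map String.mk

-- ===== PORT B =====
-- the while-loop of Source B; fuel (length of the remaining string + 1) only totalises it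
def pvLoopB (lft rgt : List Char) : Nat → List Char → List (List Char) → List (List Char)
  | 0, _, acc => acc
  | fuel+1, rest, acc =>
    let j := PySem.Chars.find rest lft
    let piece := if j = -1 then rest else PySem.Chars.slice rest none (some j)
    let k := PySem.Chars.find piece rgt
    let acc' :=
      if k ≠ -1 then
        let var := PySem.Chars.slice piece none (some k)
        if var ≠ "ip".toList ∧ var ≠ "mac".toList then acc ++ [pvJoinLowerSplit var] else acc
      else acc
    if j = -1 then acc'
    else pvLoopB lft rgt fuel (PySem.Chars.slice rest (some (j + lft.length)) none) acc'

def getProps_alt (msg : String) (left_delimiter : String) (right_delimiter : String) : List String :=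
  (pvLoopB left_delimiter.toList right_delimiter.toList (msg.toList.length + 1) msg.toList []).map String.mk

-- ===== PRECONDITION & SPEC =====
-- Pre_ excludes only an empty left delimiter, on which Python A raises ValueError.
def Pre_getProps (msg : String) (left_delimiter : String) (right_delimiter : String) : Prop :=
  left_delimiter ≠ ""
instance (msg : String) (left_delimiter : String) (right_delimiter : String) : Decidable (Pre_getProps msg left_delimiter right_delimiter) := by unfold Pre_getProps; infer_instance

def pvWitness_getProps : String × String × String := ("a<<ip>>,<<Host Name>> <<mac>>", "<<", ">>")

def Spec_getProps (msg : String) (left_delimiter : String) (right_delimiter : String) (out : List String) : Prop := out = getProps_alt msg left_delimiter right_delimiter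
instance (msg : String) (left_delimiter : String) (right_delimiter : String) (out : List String) : Decidable (Spec_getProps msg left_delimiter right_delimiter out) := by unfold Spec_getProps; infer_instance

-- ===== CLAIM (what is proved, stated in full; the proofs are below) =====
def Claim_equal_getProps : Prop := ∀ (msg : String) (left_delimiter : String) (right_delimiter : String), Dom_getProps msg left_delimiter right_delimiter → Pre_getProps msg left_delimiter right_delimiter → Spec_getProps msg left_delimiter right_delimiter (getProps msg left_delimiter right_delimiter)

-- ===== LEMMAS AND PROOFS =====
-- reference decomposition used by the proofs only: the list of split pieces,
-- as (first piece, remaining pieces)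
def pvPieces1 (sep : List Char) (l : List Char) : List Char × List (List Char) :=
  if h : PySem.Chars.find l sep = -1 ∨ sep = [] then (l, [])
  else
    let p := pvPieces1 sep (l.drop ((PySem.Chars.find l sep).toNat + sep.length))
    (l.take (PySem.Chars.find l sep).toNat, p.1 :: p.2)
termination_by l.length
decreasing_by
  push_neg at h
  have h1 := PySem.Chars.neg_one_le_find l sep
  have h2 : l ≠ [] := by
    intro hl; subst hl
    simp [PySem.Chars.find, PySem.Chars.find.go, h.2] at h
  have h3 : 0 < sep.length := List.length_pos_iff.mpr h.2
  have h4 : 0 < l.length := List.length_pos_iff.mpr h2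
  simp only [List.length_drop]
  omega

-- what one piece contributes to the final list (the body both programs share)
def pvProc (rgt : List Char) (piece : List Char) : List (List Char) :=
  if PySem.Chars.find piece rgt ≠ -1 then
    if piece.take (PySem.Chars.find piece rgt).toNat = "ip".toList ∨
       piece.take (PySem.Chars.find piece rgt).toNat = "mac".toList then []
    else [pvJoinLowerSplit (piece.take (PySem.Chars.find piece rgt).toNat)]
  else []

theorem pvFind_nil {sub : List Char} (h : sub ≠ []) : PySem.Chars.find [] sub = -1 := by
  simp [PySem.Chars.find, PySem.Chars.find.go, h]

theorem pvFindGo_shift (sub : List Char) : ∀ (t : List Char) (k : Nat),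
    PySem.Chars.find.go sub t k =
      if PySem.Chars.find t sub = -1 then -1 else PySem.Chars.find t sub + k := by
  intro t
  induction t with
  | nil =>
    intro k
    by_cases h : sub = [] <;>
      simp [PySem.Chars.find, PySem.Chars.find.go, h]
  | cons c t ih =>
    intro k
    have hf : PySem.Chars.find (c :: t) sub =
        if sub.isPrefixOf (c :: t) = true then 0
        else if PySem.Chars.find t sub = -1 then -1 else PySem.Chars.find t sub + 1 := by
      rw [PySem.Chars.find, PySem.Chars.find.go, ih 1]
      norm_num
    rw [PySem.Chars.find.go, hf, ih (k + 1)]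
    by_cases hp : sub.isPrefixOf (c :: t) = true
    · simp [hp]
    · have h1 := PySem.Chars.neg_one_le_find t sub
      by_cases he : PySem.Chars.find t sub = -1
      · simp [hp, he]
      · have hne : ¬ (PySem.Chars.find t sub + (1 : ℤ)) = -1 := by omega
        simp only [if_neg hp, if_neg he, if_neg hne]
        push_cast
        ring

theorem pvFind_cons (sub t : List Char) (c : Char) :
    PySem.Chars.find (c :: t) sub =
      if sub.isPrefixOf (c :: t) then 0
      else if PySem.Chars.find t sub = -1 then -1 else PySem.Chars.find t sub + 1 := by
  rw [PySem.Chars.find, PySem.Chars.find.go, pvFindGo_shift]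
  norm_num

theorem pvFind_ne_nil {sub l : List Char} (hs : sub ≠ []) (hf : PySem.Chars.find l sub ≠ -1) :
    l ≠ [] := by
  intro hl; subst hl; exact hf (pvFind_nil hs)

theorem pvPieces1_nil {sep : List Char} (h : sep ≠ []) : pvPieces1 sep [] = ([], []) := by
  rw [pvPieces1]
  simp [pvFind_nil h]

theorem pvPieces1_prefix {sep : List Char} (hsep : sep ≠ []) {c : Char} {rest : List Char}
    (hp : sep.isPrefixOf (c :: rest) = true) :
    pvPieces1 sep (c :: rest) =
      ([], (pvPieces1 sep ((c :: rest).drop sep.length)).1 ::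
           (pvPieces1 sep ((c :: rest).drop sep.length)).2) := by
  have hf : PySem.Chars.find (c :: rest) sep = 0 := by rw [pvFind_cons, if_pos hp]
  rw [pvPieces1]
  rw [dif_neg (by simp [hf, hsep])]
  simp [hf]

theorem pvPieces1_not_prefix {sep : List Char} (hsep : sep ≠ []) {c : Char} {rest : List Char}
    (hp : ¬ sep.isPrefixOf (c :: rest) = true) :
    pvPieces1 sep (c :: rest) =
      (c :: (pvPieces1 sep rest).1, (pvPieces1 sep rest).2) := by
  have hf := pvFind_cons sep rest c
  rw [if_neg hp] at hf
  by_cases he : PySem.Chars.find rest sep = -1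
  · have hf' : PySem.Chars.find (c :: rest) sep = -1 := by rw [hf, if_pos he]
    rw [pvPieces1, dif_pos (Or.inl hf'), pvPieces1, dif_pos (Or.inl he)]
  · have h1 := PySem.Chars.neg_one_le_find rest sep
    have hj : 0 ≤ PySem.Chars.find rest sep := by omega
    have hf' : PySem.Chars.find (c :: rest) sep = PySem.Chars.find rest sep + 1 := by
      rw [hf, if_neg he]
    have hne : ¬ PySem.Chars.find (c :: rest) sep = -1 := by rw [hf']; omega
    have hr : pvPieces1 sep rest =
        (rest.take (PySem.Chars.find rest sep).toNat,
         (pvPieces1 sep (rest.drop ((PySem.Chars.find rest sep).toNat + sep.length))).1 ::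
         (pvPieces1 sep (rest.drop ((PySem.Chars.find rest sep).toNat + sep.length))).2) := by
      rw [pvPieces1, dif_neg (by simp [he, hsep])]
    have hlft : pvPieces1 sep (c :: rest) =
        ((c :: rest).take (PySem.Chars.find (c :: rest) sep).toNat,
         (pvPieces1 sep ((c :: rest).drop ((PySem.Chars.find (c :: rest) sep).toNat + sep.length))).1 ::
         (pvPieces1 sep ((c :: rest).drop ((PySem.Chars.find (c :: rest) sep).toNat + sep.length))).2) := by
      rw [pvPieces1, dif_neg (by simp [hne, hsep])]
    rw [hlft, hr]
    have ht : (PySem.Chars.find (c :: rest) sep).toNat = (PySem.Chars.find rest sep).toNat + 1 := by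
      rw [hf']; omega
    simp [ht, List.drop_succ_cons, List.take_succ_cons, Nat.add_right_comm]

theorem pvGo_nil (sep : List Char) (fuel : Nat) (cur : List Char) (acc : List (List Char)) :
    PySem.Chars.splitOn.go sep (fuel + 1) [] cur acc = (cur.reverse :: acc).reverse := by
  rw [PySem.Chars.splitOn.go]
  omega

theorem pvGo_cons (sep : List Char) (fuel : Nat) (c : Char) (rest cur : List Char)
    (acc : List (List Char)) :
    PySem.Chars.splitOn.go sep (fuel + 1) (c :: rest) cur acc =
      if sep.isPrefixOf (c :: rest) = true then
        PySem.Chars.splitOn.go sep fuel ((c :: rest).drop sep.length) [] (cur.reverse :: acc)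
      else PySem.Chars.splitOn.go sep fuel rest (c :: cur) acc := by
  rw [PySem.Chars.splitOn.go]

theorem pvSplitGo_eq {sep : List Char} (hsep : sep ≠ []) :
    ∀ (fuel : Nat) (l cur : List Char) (acc : List (List Char)), l.length < fuel →
    PySem.Chars.splitOn.go sep fuel l cur acc =
      acc.reverse ++ (cur.reverse ++ (pvPieces1 sep l).1) :: (pvPieces1 sep l).2 := by
  intro fuel
  induction fuel with
  | zero => intro l cur acc h; omega
  | succ fuel ih =>
    intro l cur acc h
    match l with
    | [] =>
      rw [pvGo_nil]
      simp [pvPieces1_nil hsep]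
    | c :: rest =>
      rw [pvGo_cons]
      by_cases hp : sep.isPrefixOf (c :: rest) = true
      · rw [if_pos hp]
        have hlen : ((c :: rest).drop sep.length).length < fuel := by
          have h3 : 0 < sep.length := List.length_pos_iff.mpr hsep
          simp only [List.length_drop, List.length_cons]
          simp only [List.length_cons] at h
          omega
        rw [ih _ [] _ hlen, pvPieces1_prefix hsep hp]
        simp
      · rw [if_neg hp]
        have hlen : rest.length < fuel := by
          simp only [List.length_cons] at h; omega
        rw [ih rest (c :: cur) acc hlen, pvPieces1_not_prefix hsep hp]
        simp

theorem pvSplitOn_eq {sep : List Char} (hsep : sep ≠ []) (s : List Char) :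
    PySem.Chars.splitOn s sep = (pvPieces1 sep s).1 :: (pvPieces1 sep s).2 := by
  rw [PySem.Chars.splitOn, pvSplitGo_eq hsep (s.length + 1) s [] [] (by omega)]
  simp

theorem pvLoopB_eq {lft : List Char} (rgt : List Char) (hl : lft ≠ []) :
    ∀ (fuel : Nat) (rest : List Char) (acc : List (List Char)), rest.length < fuel →
    pvLoopB lft rgt fuel rest acc =
      acc ++ ((pvPieces1 lft rest).1 :: (pvPieces1 lft rest).2).flatMap (pvProc rgt) := by
  intro fuel
  induction fuel with
  | zero => intro rest acc h; omega
  | succ fuel ih =>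
    intro rest acc h
    by_cases hj : PySem.Chars.find rest lft = -1
    · rw [pvPieces1, dif_pos (Or.inl hj)]
      simp only [pvLoopB]
      unfold pvProc
      by_cases hk : PySem.Chars.find rest rgt = -1
      · simp [hj, hk]
      · have h1 := PySem.Chars.neg_one_le_find rest rgt
        have hk0 : (0:ℤ) ≤ PySem.Chars.find rest rgt := by omega
        by_cases hip : rest.take (PySem.Chars.find rest rgt).toNat = "ip".toList ∨
            rest.take (PySem.Chars.find rest rgt).toNat = "mac".toList
        · rcases hip with hv | hv <;>
            simp [hj, hk, PySem.List.slice_to rest hk0, hv]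
        · push_neg at hip
          simp only [show "ip".toList = ['i','p'] from rfl,
            show "mac".toList = ['m','a','c'] from rfl] at hip
          simp [hj, hk, PySem.List.slice_to rest hk0, hip.1, hip.2]
    · have h1 := PySem.Chars.neg_one_le_find rest lft
      have h2 := PySem.Chars.find_le_length rest lft
      have hj0 : (0:ℤ) ≤ PySem.Chars.find rest lft := by omega
      have hrest : rest ≠ [] := pvFind_ne_nil hl hj
      have h3 : 0 < lft.length := List.length_pos_iff.mpr hl
      have h4 : 0 < rest.length := List.length_pos_iff.mpr hrest
      have hlen : (rest.drop ((PySem.Chars.find rest lft).toNat + lft.length)).length < fuel := by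
        simp only [List.length_drop]; omega
      have hr : pvPieces1 lft rest =
          (rest.take (PySem.Chars.find rest lft).toNat,
           (pvPieces1 lft (rest.drop ((PySem.Chars.find rest lft).toNat + lft.length))).1 ::
           (pvPieces1 lft (rest.drop ((PySem.Chars.find rest lft).toNat + lft.length))).2) := by
        rw [pvPieces1, dif_neg (by simp [hj, hl])]
      have hs2 : PySem.Chars.slice rest (some (PySem.Chars.find rest lft + lft.length)) none =
          rest.drop ((PySem.Chars.find rest lft).toNat + lft.length) := by
        have htn : (PySem.Chars.find rest lft + (lft.length : ℤ)).toNat =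
            (PySem.Chars.find rest lft).toNat + lft.length := by omega
        simp [PySem.List.slice_from rest (by omega : (0:ℤ) ≤ PySem.Chars.find rest lft + lft.length),
          htn]
      simp only [pvLoopB]
      rw [if_neg hj, if_neg hj, hs2, ih _ _ hlen, hr]
      have hs1 : PySem.Chars.slice rest none (some (PySem.Chars.find rest lft)) =
          rest.take (PySem.Chars.find rest lft).toNat := by
        simp [PySem.List.slice_to rest hj0]
      rw [hs1]
      unfold pvProc
      by_cases hk : PySem.Chars.find (rest.take (PySem.Chars.find rest lft).toNat) rgt = -1
      · simp [hk]
      · have h5 := PySem.Chars.neg_one_le_find (rest.take (PySem.Chars.find rest lft).toNat) rgt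
        have hk0 : (0:ℤ) ≤ PySem.Chars.find (rest.take (PySem.Chars.find rest lft).toNat) rgt := by
          omega
        by_cases hip : (rest.take (PySem.Chars.find rest lft).toNat).take
              (PySem.Chars.find (rest.take (PySem.Chars.find rest lft).toNat) rgt).toNat = "ip".toList ∨
            (rest.take (PySem.Chars.find rest lft).toNat).take
              (PySem.Chars.find (rest.take (PySem.Chars.find rest lft).toNat) rgt).toNat = "mac".toList
        · rcases hip with hv | hv <;>
            simp [hk, PySem.List.slice_to _ hk0, hv]
        · push_neg at hip
          simp only [show "ip".toList = ['i','p'] from rfl,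
            show "mac".toList = ['m','a','c'] from rfl] at hip
          simp [hk, PySem.List.slice_to _ hk0, hip.1, hip.2]

theorem pvFold1_eq (rgt : List Char) (pieces : List (List Char)) (acc : List (List Char)) :
    pieces.foldl (fun acc rem =>
        if PySem.Chars.find rem rgt ≠ -1 then
          acc ++ [PySem.Chars.slice rem none (some (PySem.Chars.find rem rgt))]
        else acc) acc =
      acc ++ pieces.flatMap (fun rem =>
        if PySem.Chars.find rem rgt ≠ -1 then
          [PySem.Chars.slice rem none (some (PySem.Chars.find rem rgt))]
        else []) := by
  have hfun : (fun (acc : List (List Char)) rem =>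
      if PySem.Chars.find rem rgt ≠ -1 then
        acc ++ [PySem.Chars.slice rem none (some (PySem.Chars.find rem rgt))]
      else acc) = (fun acc rem => acc ++ (if PySem.Chars.find rem rgt ≠ -1 then
        [PySem.Chars.slice rem none (some (PySem.Chars.find rem rgt))] else [])) := by
    funext a r; split <;> simp
  rw [hfun, PySem.List.foldl_append_eq_flatMap]

theorem pvFold2_eq (vars : List (List Char)) (acc : List (List Char)) :
    vars.foldl (fun acc v =>
        if v = "ip".toList ∨ v = "mac".toList then acc
        else acc ++ [pvJoinLowerSplit v]) acc =
      acc ++ vars.flatMap (fun v =>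
        if v = "ip".toList ∨ v = "mac".toList then [] else [pvJoinLowerSplit v]) := by
  have hfun : (fun (acc : List (List Char)) v =>
      if v = "ip".toList ∨ v = "mac".toList then acc
      else acc ++ [pvJoinLowerSplit v]) = (fun acc v => acc ++
        (if v = "ip".toList ∨ v = "mac".toList then [] else [pvJoinLowerSplit v])) := by
    funext a v; split <;> simp
  rw [hfun, PySem.List.foldl_append_eq_flatMap]

theorem pvPointwise (rgt rem : List Char) :
    (if PySem.Chars.find rem rgt ≠ -1 then
        [PySem.Chars.slice rem none (some (PySem.Chars.find rem rgt))]
      else []).flatMap (fun v =>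
        if v = "ip".toList ∨ v = "mac".toList then [] else [pvJoinLowerSplit v]) =
    pvProc rgt rem := by
  unfold pvProc
  by_cases hk : PySem.Chars.find rem rgt = -1
  · simp [hk]
  · have h1 := PySem.Chars.neg_one_le_find rem rgt
    have hk0 : (0:ℤ) ≤ PySem.Chars.find rem rgt := by omega
    rw [if_pos hk, if_pos hk]
    simp only [PySem.Chars.slice_eq_listSlice, PySem.List.slice_to rem hk0,
      List.flatMap_cons, List.flatMap_nil, List.append_nil]

-- ===== VERDICT (by name: the statement is the Claim_ definition above) =====
theorem getProps_spec : Claim_equal_getProps := by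
  intro msg left_delimiter right_delimiter _ hpre
  unfold Spec_getProps Pre_getProps at *
  have hl : left_delimiter.toList ≠ [] := by
    simpa [String.toList_eq_nil_iff] using hpre
  unfold getProps getProps_alt
  rw [PySem.Chars.split?, if_neg (by simpa [List.isEmpty_iff] using hl)]
  simp only
  rw [pvSplitOn_eq hl, pvFold1_eq, pvFold2_eq]
  simp only [List.nil_append]
  rw [List.flatMap_assoc]
  rw [pvLoopB_eq right_delimiter.toList hl (msg.toList.length + 1) msg.toList [] (by omega)]
  simp only [List.nil_append]
  congr 1
  simp only [List.flatMap_def]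
  congr 1
  apply List.map_congr_left
  intro rem _
  simpa [List.flatMap_def] using pvPointwise right_delimiter.toList rem
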